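-- pv_equiv track=rewrite | github.com/github-SameLin/Algorithm | leetcode.py | respace
-- ===== SOURCE A (Python) =====
-- from typing import List
--
-- def respace(dictionary: List[str], sentence: str) -> int:
--     word_len = [ len(x) for x in dictionary]
--     word_max_len = max(word_len)
--
--     s_len = len(sentence)
--     dp = [0 for _ in range(s_len+1)]
--     for i in range(1, s_len+1):
--         dp[i] = dp[i-1] + 1
--         for j in range(max(0,i- word_max_len), i):
--             if sentence[j : i] in dictionary:
--                 dp[i] = min(dp[i], dp[j])
--     return dp[s_len]
-- ===== SOURCE B (Python) =====
-- def respace(dictionary, sentence):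
--     n = len(sentence)
--     dp = [0]
--     for i in range(1, n + 1):
--         best = dp[i - 1] + 1
--         for w in dictionary:
--             L = len(w)
--             if 0 < L <= i and sentence[i - L:i] == w:
--                 best = min(best, dp[i - L])
--         dp.append(best)
--     return dp[n]
-- ===== Notes on version B (the rewrite author's own statement) =====
-- stated objective: alternative
-- what changed: Inner pass now iterates over the dictionary words and compares each word against the matching suffix of sentence[:i] directly, instead of scanning every window start j in the max-word-length window and testing the slice for list membership; the dp table is grown by appending instead of being preallocated and mutated.
-- crash fix: On an empty dictionary A raises ValueError (max() of an empty sequence); B naturally returns len(sentence), every character unrecognized. — e.g. on respace([], "ab"): A raises ValueError, B returns 2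
import Mathlib
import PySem

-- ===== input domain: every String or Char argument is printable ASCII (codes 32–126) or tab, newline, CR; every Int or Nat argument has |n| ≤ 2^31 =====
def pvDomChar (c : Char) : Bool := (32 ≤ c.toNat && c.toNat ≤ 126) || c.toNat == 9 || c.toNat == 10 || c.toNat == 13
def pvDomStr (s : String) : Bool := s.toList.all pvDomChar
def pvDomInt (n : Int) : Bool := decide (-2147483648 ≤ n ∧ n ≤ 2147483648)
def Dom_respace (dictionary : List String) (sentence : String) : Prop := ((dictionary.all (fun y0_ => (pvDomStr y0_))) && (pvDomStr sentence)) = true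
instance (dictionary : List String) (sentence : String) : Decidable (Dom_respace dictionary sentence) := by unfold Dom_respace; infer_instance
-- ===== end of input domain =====

-- B replaces A's per-position window scan with dict-membership by a single pass over the
-- dictionary words per end index (suffix comparison), and grows the dp list by appending
-- instead of preallocating; B also returns len(sentence) where A raises on an empty dictionary.


-- ===== PORT A =====
def respace (dictionary : List String) (sentence : String) : Int :=
  let wordLen : List Int := dictionary.map (fun x => PySem.Str.len x)
  match PySem.List.max? wordLen (fun y => y) with
  | none => 0   -- Python: max([]) raises ValueError here; excluded by Pre_respace
  | some wordMaxLen =>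
    let sLen : Int := PySem.Str.len sentence
    let dp0 : List Int := (PySem.List.pyRange 0 (sLen + 1) 1).map (fun _ => 0)
    let dp := (PySem.List.pyRange 1 (sLen + 1) 1).foldl (fun dp i =>
      let dpi := PySem.List.pyGetD dp (i - 1) 0 + 1
      let dpi := (PySem.List.pyRange (max 0 (i - wordMaxLen)) i 1).foldl (fun dpi j =>
        if dictionary.contains (PySem.Str.slice sentence (some j) (some i)) then
          min dpi (PySem.List.pyGetD dp j 0)
        else dpi) dpi
      PySem.List.pySetD dp i dpi) dp0
    PySem.List.pyGetD dp sLen 0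

-- ===== PORT B =====
def respace_alt (dictionary : List String) (sentence : String) : Int :=
  let n : Int := PySem.Str.len sentence
  let dp := (PySem.List.pyRange 1 (n + 1) 1).foldl (fun dp i =>
    let best := PySem.List.pyGetD dp (i - 1) 0 + 1
    let best := dictionary.foldl (fun best w =>
      let L : Int := PySem.Str.len w
      if 0 < L ∧ L ≤ i ∧ PySem.Str.slice sentence (some (i - L)) (some i) = w then
        min best (PySem.List.pyGetD dp (i - L) 0)
      else best) best
    dp ++ [best]) [0]
  PySem.List.pyGetD dp n 0

-- ===== PRECONDITION & SPEC =====
-- Python A raises ValueError (max of an empty sequence) exactly when the dictionary is empty.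
def Pre_respace (dictionary : List String) (sentence : String) : Prop := dictionary ≠ []
instance (dictionary : List String) (sentence : String) : Decidable (Pre_respace dictionary sentence) := by unfold Pre_respace; infer_instance
def pvWitness_respace : List String × String := (["ab", "b"], "aab")

-- On an empty dictionary A raises ValueError from max([]); B returns len(sentence).
def Raises_respace (dictionary : List String) (sentence : String) : Prop := dictionary = []
instance (dictionary : List String) (sentence : String) : Decidable (Raises_respace dictionary sentence) := by unfold Raises_respace; infer_instance
def pvRaiseWitness_respace : List String × String := ([], "ab")
def pvRaiseWitnessOut_respace : Int := 2

def Spec_respace (dictionary : List String) (sentence : String) (out : Int) : Prop := out = respace_alt dictionary sentence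
instance (dictionary : List String) (sentence : String) (out : Int) : Decidable (Spec_respace dictionary sentence out) := by unfold Spec_respace; infer_instance

-- ===== CLAIM (what is proved, stated in full; the proofs are below) =====
def Claim_equal_respace : Prop := ∀ (dictionary : List String) (sentence : String), Dom_respace dictionary sentence → Pre_respace dictionary sentence → Spec_respace dictionary sentence (respace dictionary sentence)
def Claim_raises_respace : Prop := (∀ (dictionary : List String) (sentence : String), Dom_respace dictionary sentence → Raises_respace dictionary sentence → ¬ Pre_respace dictionary sentence) ∧ (Dom_respace (pvRaiseWitness_respace.1) (pvRaiseWitness_respace.2) ∧ Raises_respace (pvRaiseWitness_respace.1) (pvRaiseWitness_respace.2) ∧ respace_alt (pvRaiseWitness_respace.1) (pvRaiseWitness_respace.2) = pvRaiseWitnessOut_respace)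

-- ===== LEMMAS AND PROOFS =====

def pvMinFold {α : Type} (P : α → Prop) [DecidablePred P] (g : α → Int) (l : List α) (init : Int) : Int :=
  l.foldl (fun a x => if P x then min a (g x) else a) init

theorem pvMinFold_cons {α : Type} (P : α → Prop) [DecidablePred P] (g : α → Int) (y : α) (t : List α) (init : Int) :
    pvMinFold P g (y :: t) init = pvMinFold P g t (if P y then min init (g y) else init) := by
  simp only [pvMinFold, List.foldl_cons]

theorem pvMinFold_le_init {α : Type} (P : α → Prop) [DecidablePred P] (g : α → Int) (l : List α) (init : Int) :
    pvMinFold P g l init ≤ init := by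
  induction l generalizing init with
  | nil => simp [pvMinFold]
  | cons x t ih =>
    rw [pvMinFold_cons]
    split_ifs with h
    · exact le_trans (ih (min init (g x))) (min_le_left _ _)
    · exact ih init

theorem pvMinFold_le {α : Type} (P : α → Prop) [DecidablePred P] (g : α → Int) {l : List α} {x : α}
    (hx : x ∈ l) (hP : P x) (init : Int) : pvMinFold P g l init ≤ g x := by
  induction l generalizing init with
  | nil => simp at hx
  | cons y t ih =>
    rw [pvMinFold_cons]
    rcases List.mem_cons.mp hx with rfl | hmem
    · rw [if_pos hP]
      exact le_trans (pvMinFold_le_init P g t _) (min_le_right _ _)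
    · split_ifs with h
      · exact ih hmem _
      · exact ih hmem _

theorem pvMinFold_cases {α : Type} (P : α → Prop) [DecidablePred P] (g : α → Int) (l : List α) (init : Int) :
    pvMinFold P g l init = init ∨ ∃ x ∈ l, P x ∧ pvMinFold P g l init = g x := by
  induction l generalizing init with
  | nil => left; rfl
  | cons y t ih =>
    rw [pvMinFold_cons]
    split_ifs with h
    · rcases ih (min init (g y)) with heq | ⟨x, hx, hPx, hval⟩
      · rcases min_choice init (g y) with hm | hm
        · left; rw [heq, hm]
        · right; exact ⟨y, List.mem_cons_self, h, by rw [heq, hm]⟩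
      · right; exact ⟨x, List.mem_cons_of_mem _ hx, hPx, hval⟩
    · rcases ih init with heq | ⟨x, hx, hPx, hval⟩
      · left; exact heq
      · right; exact ⟨x, List.mem_cons_of_mem _ hx, hPx, hval⟩

theorem pvMinFold_congr {α β : Type} (P1 : α → Prop) [DecidablePred P1] (g1 : α → Int) (l1 : List α)
    (P2 : β → Prop) [DecidablePred P2] (g2 : β → Int) (l2 : List β) (init : Int)
    (h12 : ∀ x ∈ l1, P1 x → ∃ y ∈ l2, P2 y ∧ g2 y = g1 x)
    (h21 : ∀ y ∈ l2, P2 y → ∃ x ∈ l1, P1 x ∧ g1 x = g2 y) :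
    pvMinFold P1 g1 l1 init = pvMinFold P2 g2 l2 init := by
  apply le_antisymm
  · rcases pvMinFold_cases P2 g2 l2 init with heq | ⟨y, hy, hPy, hval⟩
    · rw [heq]; exact pvMinFold_le_init P1 g1 l1 init
    · obtain ⟨x, hx, hPx, hg⟩ := h21 y hy hPy
      rw [hval, ← hg]; exact pvMinFold_le P1 g1 hx hPx init
  · rcases pvMinFold_cases P1 g1 l1 init with heq | ⟨x, hx, hPx, hval⟩
    · rw [heq]; exact pvMinFold_le_init P2 g2 l2 init
    · obtain ⟨y, hy, hPy, hg⟩ := h12 x hx hPx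
      rw [hval, ← hg]; exact pvMinFold_le P2 g2 hy hPy init

theorem pvLenSliceList (s : List Char) (j i : Int) (h0 : 0 ≤ j) (hj : j ≤ i) (hi : i ≤ s.length) :
    ((PySem.List.slice s (some j) (some i)).length : Int) = i - j := by
  rw [PySem.List.length_slice]
  simp [PySem.List.clampIdx]
  split_ifs <;> omega

theorem pvLenSlice (s : String) (j i : Int) (h0 : 0 ≤ j) (hj : j ≤ i) (hi : i ≤ s.toList.length) :
    PySem.Str.len (PySem.Str.slice s (some j) (some i)) = i - j := by
  have h1 : PySem.Str.len (PySem.Str.slice s (some j) (some i))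
      = ((PySem.List.slice s.toList (some j) (some i)).length : Int) := by simp [pysem]
  rw [h1]
  exact pvLenSliceList s.toList j i h0 hj hi

theorem pvGetDAppend (dpB rest : List Int) (j : Int) (h0 : 0 ≤ j) (hj : j < dpB.length) :
    PySem.List.pyGetD (dpB ++ rest) j 0 = PySem.List.pyGetD dpB j 0 := by
  rw [PySem.List.pyGetD_eq_getElem _ _ h0 (by simp; omega), PySem.List.pyGetD_eq_getElem _ _ h0 (by exact_mod_cast hj)]
  exact List.getElem_append_left ..

theorem pvInnerEq (dict : List String) (sentence : String) (wml : Int)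
    (hw : PySem.List.max? (dict.map (fun x => PySem.Str.len x)) (fun y => y) = some wml)
    (dpB rest : List Int) (i : Int) (_hi1 : 1 ≤ i) (hlen : (dpB.length : Int) = i)
    (hin : i ≤ sentence.toList.length) (init : Int) :
    (PySem.List.pyRange (max 0 (i - wml)) i 1).foldl
      (fun a j => if dict.contains (PySem.Str.slice sentence (some j) (some i)) then
          min a (PySem.List.pyGetD (dpB ++ rest) j 0) else a) init
    = dict.foldl
      (fun a w => if 0 < PySem.Str.len w ∧ PySem.Str.len w ≤ i ∧
            PySem.Str.slice sentence (some (i - PySem.Str.len w)) (some i) = w then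
          min a (PySem.List.pyGetD dpB (i - PySem.Str.len w) 0) else a) init := by
  apply pvMinFold_congr
    (fun j => dict.contains (PySem.Str.slice sentence (some j) (some i)) = true)
    (fun j => PySem.List.pyGetD (dpB ++ rest) j 0) _
    (fun w => 0 < PySem.Str.len w ∧ PySem.Str.len w ≤ i ∧
        PySem.Str.slice sentence (some (i - PySem.Str.len w)) (some i) = w)
    (fun w => PySem.List.pyGetD dpB (i - PySem.Str.len w) 0) _ init
  · intro j hj hP
    have hmem := (PySem.List.mem_pyRange_one).mp hj
    have hj0 : 0 ≤ j := le_trans (le_max_left 0 _) hmem.1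
    have hji : j < i := hmem.2
    have hL : PySem.Str.len (PySem.Str.slice sentence (some j) (some i)) = i - j :=
      pvLenSlice sentence j i hj0 (le_of_lt hji) hin
    have hidx : i - PySem.Str.len (PySem.Str.slice sentence (some j) (some i)) = j := by omega
    refine ⟨PySem.Str.slice sentence (some j) (some i), List.contains_iff_mem.mp hP,
      ⟨by omega, by omega, by rw [hidx]⟩, ?_⟩
    rw [hidx]
    exact (pvGetDAppend dpB rest j hj0 (by omega)).symm
  · intro w hwmem hP
    obtain ⟨hL0, hLi, hsl⟩ := hP
    have hwml : PySem.Str.len w ≤ wml := by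
      have := PySem.List.max?_isMax hw (PySem.Str.len w) (List.mem_map_of_mem hwmem)
      simpa using this
    refine ⟨i - PySem.Str.len w, ?_, ?_, ?_⟩
    · rw [PySem.List.mem_pyRange_one]
      exact ⟨max_le (by omega) (by omega), by omega⟩
    · rw [hsl]
      exact List.contains_iff_mem.mpr hwmem
    · exact pvGetDAppend dpB rest (i - PySem.Str.len w) (by omega) (by omega)

def pvStepA (dict : List String) (sentence : String) (wml : Int) (dp : List Int) (i : Int) : List Int :=
  PySem.List.pySetD dp i
    ((PySem.List.pyRange (max 0 (i - wml)) i 1).foldl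
      (fun a j => if dict.contains (PySem.Str.slice sentence (some j) (some i)) then
          min a (PySem.List.pyGetD dp j 0) else a)
      (PySem.List.pyGetD dp (i - 1) 0 + 1))

def pvStepB (dict : List String) (sentence : String) (dp : List Int) (i : Int) : List Int :=
  dp ++ [dict.foldl
      (fun a w => if 0 < PySem.Str.len w ∧ PySem.Str.len w ≤ i ∧
            PySem.Str.slice sentence (some (i - PySem.Str.len w)) (some i) = w then
          min a (PySem.List.pyGetD dp (i - PySem.Str.len w) 0) else a)
      (PySem.List.pyGetD dp (i - 1) 0 + 1)]

theorem pvSetAppend (dpB : List Int) (v : Int) (rest : List Int) :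
    PySem.List.pySetD (dpB ++ 0 :: rest) (dpB.length : Int) v = dpB ++ v :: rest := by
  rw [PySem.List.pySetD_natCast, List.set_append]
  simp

theorem pvInv (dict : List String) (sentence : String) (wml : Int)
    (hw : PySem.List.max? (dict.map (fun x => PySem.Str.len x)) (fun y => y) = some wml) :
    ∀ k : Nat, k ≤ sentence.toList.length →
      ((PySem.List.pyRange 1 ((k : Int) + 1) 1).foldl (pvStepB dict sentence) [0]).length = k + 1 ∧
      (PySem.List.pyRange 1 ((k : Int) + 1) 1).foldl (pvStepA dict sentence wml)
          (List.replicate (sentence.toList.length + 1) 0)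
        = ((PySem.List.pyRange 1 ((k : Int) + 1) 1).foldl (pvStepB dict sentence) [0])
            ++ List.replicate (sentence.toList.length - k) 0 := by
  intro k
  induction k with
  | zero =>
    intro _
    rw [show ((0 : Nat) : Int) + 1 = 1 by omega, PySem.List.pyRange_one_eq_nil (by omega)]
    simp [List.replicate_succ]
  | succ k ih =>
    intro hk
    obtain ⟨hlen, heq⟩ := ih (by omega)
    have hsplit : PySem.List.pyRange 1 (((k + 1 : Nat) : Int) + 1) 1
        = PySem.List.pyRange 1 ((k : Int) + 1) 1 ++ [(k : Int) + 1] := by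
      rw [show (((k + 1 : Nat) : Int) + 1) = ((k : Int) + 1) + 1 by push_cast; ring]
      exact PySem.List.pyRange_one_succ_right (by omega)
    rw [hsplit, List.foldl_append, List.foldl_append, List.foldl_cons, List.foldl_nil,
        List.foldl_cons, List.foldl_nil, heq]
    set dpB := (PySem.List.pyRange 1 ((k : Int) + 1) 1).foldl (pvStepB dict sentence) [0] with hdpB
    have hrepl : List.replicate (sentence.toList.length - k) (0 : Int)
        = 0 :: List.replicate (sentence.toList.length - (k + 1)) 0 := by
      rw [← List.replicate_succ]
      congr 1
      omega
    have hglue : PySem.List.pyGetD (dpB ++ List.replicate (sentence.toList.length - k) 0) ((k : Int) + 1 - 1) 0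
        = PySem.List.pyGetD dpB ((k : Int) + 1 - 1) 0 :=
      pvGetDAppend _ _ _ (by omega) (by omega)
    have hinner := pvInnerEq dict sentence wml hw dpB (List.replicate (sentence.toList.length - k) 0)
      ((k : Int) + 1) (by omega) (by exact_mod_cast hlen) (by omega)
      (PySem.List.pyGetD dpB ((k : Int) + 1 - 1) 0 + 1)
    constructor
    · simp [pvStepB, hlen]
    · rw [pvStepA, hglue, hinner]
      rw [hrepl, show ((k : Int) + 1) = ((dpB.length : Nat) : Int) by rw [hlen]; push_cast; ring]
      rw [pvSetAppend]
      rw [pvStepB]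
      simp

theorem pvRespaceEq (dict : List String) (sentence : String) (wml : Int)
    (hw : PySem.List.max? (dict.map (fun x => PySem.Str.len x)) (fun y => y) = some wml) :
    respace dict sentence
      = PySem.List.pyGetD
          ((PySem.List.pyRange 1 (PySem.Str.len sentence + 1) 1).foldl (pvStepA dict sentence wml)
            ((PySem.List.pyRange 0 (PySem.Str.len sentence + 1) 1).map (fun _ => 0)))
          (PySem.Str.len sentence) 0 := by
  simp only [respace, hw]
  rfl

theorem pvRespaceAltEq (dict : List String) (sentence : String) :
    respace_alt dict sentence
      = PySem.List.pyGetD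
          ((PySem.List.pyRange 1 (PySem.Str.len sentence + 1) 1).foldl (pvStepB dict sentence) [0])
          (PySem.Str.len sentence) 0 := rfl

theorem pvStrLen (s : String) : PySem.Str.len s = (s.toList.length : Int) := by simp [pysem]

theorem pvMainEq (dict : List String) (sentence : String) (hpre : dict ≠ []) :
    respace dict sentence = respace_alt dict sentence := by
  cases hw : PySem.List.max? (dict.map (fun x => PySem.Str.len x)) (fun y => y) with
  | none =>
    rw [PySem.List.max?_eq_none_iff] at hw
    simp at hw
    exact absurd hw hpre
  | some wml =>
    rw [pvRespaceEq dict sentence wml hw, pvRespaceAltEq, pvStrLen]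
    have hmap : ((PySem.List.pyRange 0 ((sentence.toList.length : Int) + 1) 1).map (fun _ => (0:Int)))
        = List.replicate (sentence.toList.length + 1) 0 := by
      rw [List.map_const']
      congr 1
      rw [PySem.List.length_pyRange_one]
      omega
    rw [hmap]
    obtain ⟨hlen, heq⟩ := pvInv dict sentence wml hw sentence.toList.length le_rfl
    rw [heq]
    simp

-- ===== VERDICT (by name: the statement is the Claim_ definition above) =====
theorem respace_spec : Claim_equal_respace := by
  intro dictionary sentence _hdom hpre
  unfold Spec_respace
  exact pvMainEq dictionary sentence hpre

def respace_raises : Claim_raises_respace := by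
  unfold Claim_raises_respace
  exact ⟨fun d s _hdom h hpre => hpre h, by decide⟩
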